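-- pv_equiv track=rewrite | github.com/hargunmujral/24-solver | solver.py | build_permutations
-- ===== SOURCE A (Python) =====
-- def build_permutations(nums):
--     permutations = []
--     for a in nums:
--         for b in nums:
--             if b == a:
--                 continue
--             for c in nums:
--                 if c in [a, b]:
--                     continue
--                 for d in nums:
--                     if d in [a, b, c]:
--                         continue
--                     permutations.append([a, b, c, d])
--     return permutations
-- ===== SOURCE B (Python) =====
-- def build_permutations(nums):
--     def extend(chosen, k):
--         if k == 0:
--             return [chosen]
--         out = []
--         for x in nums:
--             if x not in chosen:
--                 out.extend(extend(chosen + [x], k - 1))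
--         return out
--     return extend([], 4)
-- ===== Notes on version B (the rewrite author's own statement) =====
-- stated objective: alternative
-- what changed: Replaces A's four hard-coded nested loops with a single depth-4 recursive extender that builds each tuple position by position over the not-yet-chosen values.
import Mathlib
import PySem

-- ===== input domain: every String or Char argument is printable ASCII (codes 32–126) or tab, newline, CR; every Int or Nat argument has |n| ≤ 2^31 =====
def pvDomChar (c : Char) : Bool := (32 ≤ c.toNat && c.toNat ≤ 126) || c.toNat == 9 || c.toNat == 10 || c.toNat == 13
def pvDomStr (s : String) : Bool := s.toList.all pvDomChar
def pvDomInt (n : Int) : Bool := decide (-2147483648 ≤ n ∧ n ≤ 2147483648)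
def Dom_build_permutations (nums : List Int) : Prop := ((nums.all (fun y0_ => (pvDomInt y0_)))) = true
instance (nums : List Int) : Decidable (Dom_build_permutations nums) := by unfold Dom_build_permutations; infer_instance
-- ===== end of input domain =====

-- B replaces A's four hard-coded nested loops with one depth-4 recursive extender (alternative decomposition, same cost).

-- ===== PORT A =====
def build_permutations (nums : List Int) : List (List Int) :=
  nums.foldl (fun perms a =>
    nums.foldl (fun perms b =>
      if b = a then perms
      else nums.foldl (fun perms c =>
        if c ∈ [a, b] then perms
        else nums.foldl (fun perms d =>
          if d ∈ [a, b, c] then perms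
          else perms ++ [[a, b, c, d]]) perms) perms) perms) []

-- ===== PORT B =====
-- helper 'extend': builds tuples position by position, k positions remaining
def bp_extend (nums : List Int) (chosen : List Int) : Nat → List (List Int)
  | 0 => [chosen]
  | k + 1 => nums.foldl (fun out x => if x ∈ chosen then out else out ++ bp_extend nums (chosen ++ [x]) k) []

def build_permutations_alt (nums : List Int) : List (List Int) :=
  bp_extend nums [] 4

-- ===== PRECONDITION & SPEC =====
def Spec_build_permutations (nums : List Int) (out : List (List Int)) : Prop := out = build_permutations_alt nums
instance (nums : List Int) (out : List (List Int)) : Decidable (Spec_build_permutations nums out) := by unfold Spec_build_permutations; infer_instance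

-- ===== CLAIM (what is proved, stated in full; the proofs are below) =====
def Claim_equal_build_permutations : Prop := ∀ (nums : List Int), Dom_build_permutations nums → Spec_build_permutations nums (build_permutations nums)

-- ===== LEMMAS AND PROOFS =====

-- a foldl whose body only appends becomes a flatMap
theorem foldl_extend {α β : Type} (f : List β → α → List β) (h : α → List β)
    (H : ∀ acc x, f acc x = acc ++ h x) (xs : List α) (acc : List β) :
    xs.foldl f acc = acc ++ xs.flatMap h := by
  induction xs generalizing acc with
  | nil => simp
  | cons x xs ih => simp [List.foldl_cons, H, ih, List.append_assoc]

theorem A_flat (nums : List Int) : build_permutations nums =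
    nums.flatMap (fun a => nums.flatMap (fun b => if b = a then [] else
      nums.flatMap (fun c => if c ∈ [a, b] then [] else
        nums.flatMap (fun d => if d ∈ [a, b, c] then [] else [[a, b, c, d]])))) := by
  have L4 : ∀ (a b c : Int) (acc : List (List Int)),
      nums.foldl (fun perms d => if d ∈ [a, b, c] then perms else perms ++ [[a, b, c, d]]) acc
      = acc ++ nums.flatMap (fun d => if d ∈ [a, b, c] then [] else [[a, b, c, d]]) := by
    intro a b c acc
    apply foldl_extend
    intro acc d; split <;> simp
  have L3 : ∀ (a b : Int) (acc : List (List Int)),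
      nums.foldl (fun perms c => if c ∈ [a, b] then perms
        else nums.foldl (fun perms d => if d ∈ [a, b, c] then perms else perms ++ [[a, b, c, d]]) perms) acc
      = acc ++ nums.flatMap (fun c => if c ∈ [a, b] then [] else
          nums.flatMap (fun d => if d ∈ [a, b, c] then [] else [[a, b, c, d]])) := by
    intro a b acc
    apply foldl_extend
    intro acc c; split
    · simp
    · rw [L4]
  have L2 : ∀ (a : Int) (acc : List (List Int)),
      nums.foldl (fun perms b => if b = a then perms
        else nums.foldl (fun perms c => if c ∈ [a, b] then perms
          else nums.foldl (fun perms d => if d ∈ [a, b, c] then perms else perms ++ [[a, b, c, d]]) perms) perms) acc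
      = acc ++ nums.flatMap (fun b => if b = a then [] else
          nums.flatMap (fun c => if c ∈ [a, b] then [] else
            nums.flatMap (fun d => if d ∈ [a, b, c] then [] else [[a, b, c, d]]))) := by
    intro a acc
    apply foldl_extend
    intro acc b; split
    · simp
    · rw [L3]
  unfold build_permutations
  rw [foldl_extend _ _ (fun acc a => L2 a acc)]
  simp

theorem B_flat (nums chosen : List Int) (k : Nat) :
    bp_extend nums chosen (k + 1) =
      nums.flatMap (fun x => if x ∈ chosen then [] else bp_extend nums (chosen ++ [x]) k) := by
  show nums.foldl _ [] = _
  rw [foldl_extend _ (fun x => if x ∈ chosen then [] else bp_extend nums (chosen ++ [x]) k)]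
  · simp
  · intro acc x; split <;> simp

theorem build_permutations_spec' (nums : List Int) :
    build_permutations nums = build_permutations_alt nums := by
  rw [A_flat]
  unfold build_permutations_alt
  rw [show (4 : Nat) = 3 + 1 from rfl, B_flat]
  refine List.flatMap_congr ?_
  intro a _
  rw [show (3 : Nat) = 2 + 1 from rfl, B_flat]
  simp only [List.not_mem_nil, if_false, List.nil_append]
  refine List.flatMap_congr ?_
  intro b _
  by_cases hba : b = a
  · simp [hba]
  · rw [if_neg hba, if_neg (by simpa using hba), show (2 : Nat) = 1 + 1 from rfl, B_flat]
    refine List.flatMap_congr ?_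
    intro c _
    by_cases hc : c ∈ [a, b]
    · simp [hc]
    · rw [if_neg hc, if_neg (by simpa using hc), show (1 : Nat) = 0 + 1 from rfl, B_flat]
      refine List.flatMap_congr ?_
      intro d _
      by_cases hd : d ∈ [a, b, c]
      · simp [hd]
      · rw [if_neg hd, if_neg (by simpa using hd)]
        rfl

-- ===== VERDICT (by name: the statement is the Claim_ definition above) =====
theorem build_permutations_spec : Claim_equal_build_permutations := by
  intro nums _
  exact build_permutations_spec' nums
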